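-- pv_equiv track=rewrite | github.com/vitorflopes/TP2-Sistemas-Operacionais | q10.py | contar_livros_impares
-- ===== SOURCE A (Python) =====
-- def contar_livros_impares(fila):
--     contador = 0
--
--     for numero in fila:
--         # Verificação manual para número ímpar: subtraindo 2 até que o número chegue a 0 ou 1
--         n = numero
--         while n > 1:
--             n = n - 2  # Subtrai 2 até reduzir o número a 0 (par) ou 1 (ímpar)
--
--         if n == 1:  # Se restar 1, o número é ímpar
--             contador += 1
--
--     return contador
-- ===== SOURCE B (Python) =====
-- def contar_livros_impares(fila):
--     return sum(1 for numero in fila if numero > 0 and numero % 2 == 1)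
-- ===== Notes on version B (the rewrite author's own statement) =====
-- stated objective: faster
-- what changed: Replaced the per-element repeated subtract-2 reduction loop by a direct 'numero > 0 and numero % 2 == 1' modulo test in a single comprehension.
import Mathlib
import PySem

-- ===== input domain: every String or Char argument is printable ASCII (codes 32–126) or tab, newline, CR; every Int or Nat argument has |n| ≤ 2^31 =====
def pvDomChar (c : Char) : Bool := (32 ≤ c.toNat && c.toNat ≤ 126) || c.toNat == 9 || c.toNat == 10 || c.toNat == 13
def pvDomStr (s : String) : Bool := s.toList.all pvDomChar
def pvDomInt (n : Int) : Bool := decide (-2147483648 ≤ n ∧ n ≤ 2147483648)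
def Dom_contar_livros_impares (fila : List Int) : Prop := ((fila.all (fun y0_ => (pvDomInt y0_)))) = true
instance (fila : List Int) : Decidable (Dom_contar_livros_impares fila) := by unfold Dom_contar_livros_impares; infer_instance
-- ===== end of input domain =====

-- B replaces A's per-element subtract-2 reduction loop by a direct modulo test (a different, value-independent algorithm).

-- ===== PORT A =====
-- the inner `while n > 1: n = n - 2` loop of A
def pvReduceA (n : Int) : Int :=
  if h : n > 1 then pvReduceA (n - 2) else n
termination_by n.toNat
decreasing_by omega

def contar_livros_impares (fila : List Int) : Int :=
  fila.foldl (fun contador numero =>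
    if pvReduceA numero = 1 then contador + 1 else contador) 0

-- ===== PORT B =====
def contar_livros_impares_alt (fila : List Int) : Int :=
  ((fila.filter (fun numero => numero > 0 && PySem.Int.mod numero 2 == 1)).map (fun _ => (1 : Int))).sum

-- ===== PRECONDITION & SPEC =====
def Spec_contar_livros_impares (fila : List Int) (out : Int) : Prop := out = contar_livros_impares_alt fila
instance (fila : List Int) (out : Int) : Decidable (Spec_contar_livros_impares fila out) := by unfold Spec_contar_livros_impares; infer_instance

-- ===== CLAIM (what is proved, stated in full; the proofs are below) =====
def Claim_equal_contar_livros_impares : Prop := ∀ (fila : List Int), Dom_contar_livros_impares fila → Spec_contar_livros_impares fila (contar_livros_impares fila)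

-- ===== LEMMAS AND PROOFS =====

theorem pvReduceA_eq_one_iff (n : Int) : pvReduceA n = 1 ↔ (0 < n ∧ n % 2 = 1) := by
  induction n using pvReduceA.induct with
  | case1 n h ih =>
    rw [pvReduceA, dif_pos h]
    constructor
    · intro he
      have := ih.mp he
      omega
    · intro he
      exact ih.mpr (by omega)
  | case2 n h =>
    rw [pvReduceA, dif_neg h]
    omega

theorem pvCount_eq (fila : List Int) (c : Int) :
    fila.foldl (fun contador numero =>
      if pvReduceA numero = 1 then contador + 1 else contador) c
    = c + ((fila.filter (fun numero => numero > 0 && PySem.Int.mod numero 2 == 1)).map (fun _ => (1 : Int))).sum := by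
  induction fila generalizing c with
  | nil => simp
  | cons x xs ih =>
    simp only [List.foldl_cons, List.filter_cons]
    by_cases hx : pvReduceA x = 1
    · have h2 := (pvReduceA_eq_one_iff x).mp hx
      have : (x > 0 && PySem.Int.mod x 2 == 1) = true := by
        simp only [PySem.Int.mod, Int.fmod_eq_emod, decide_eq_true_eq, Bool.and_eq_true, beq_iff_eq]
        omega
      rw [if_pos hx, this, ih]
      simp
      ring
    · have h2 : ¬ (0 < x ∧ x % 2 = 1) := fun h => hx ((pvReduceA_eq_one_iff x).mpr h)
      have : (x > 0 && PySem.Int.mod x 2 == 1) = false := by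
        simp only [PySem.Int.mod, Int.fmod_eq_emod, Bool.and_eq_false_iff,
          decide_eq_false_iff_not, not_lt, beq_eq_false_iff_ne, ne_eq]
        omega
      rw [if_neg hx, this, ih]
      simp

-- ===== VERDICT (by name: the statement is the Claim_ definition above) =====
theorem contar_livros_impares_spec : Claim_equal_contar_livros_impares := by
  intro fila _
  show _ = _
  unfold contar_livros_impares contar_livros_impares_alt
  rw [pvCount_eq]
  simp
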